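-- pv_equiv track=rewrite | github.com/WanderingBoots/KingKooperDiscordBot | KingKooperBot.py | searchInListofDicts
-- ===== SOURCE A (Python) =====
-- def searchInListofDicts(value, list_of_dicts) -> bool:
--     varCheck = False
--     index = 0
--     index_snapshot = 0
--     for d in list_of_dicts:
--         for key in d:
--             if d[key] == value:
--                 varCheck = True
--                 index_snapshot = index
--         index += 1
--     return varCheck, index_snapshot
-- ===== SOURCE B (Python) =====
-- def searchInListofDicts(value, list_of_dicts) -> bool:
--     for index, d in reversed(list(enumerate(list_of_dicts))):
--         if value in d.values():
--             return True, index
--     return False, 0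
-- ===== Notes on version B (the rewrite author's own statement) =====
-- stated objective: simpler
-- what changed: B scans the enumerated list in reverse and returns at the first dict whose values contain the target, instead of scanning everything forward while overwriting a snapshot variable; no-match still yields (False, 0).
import Mathlib
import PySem

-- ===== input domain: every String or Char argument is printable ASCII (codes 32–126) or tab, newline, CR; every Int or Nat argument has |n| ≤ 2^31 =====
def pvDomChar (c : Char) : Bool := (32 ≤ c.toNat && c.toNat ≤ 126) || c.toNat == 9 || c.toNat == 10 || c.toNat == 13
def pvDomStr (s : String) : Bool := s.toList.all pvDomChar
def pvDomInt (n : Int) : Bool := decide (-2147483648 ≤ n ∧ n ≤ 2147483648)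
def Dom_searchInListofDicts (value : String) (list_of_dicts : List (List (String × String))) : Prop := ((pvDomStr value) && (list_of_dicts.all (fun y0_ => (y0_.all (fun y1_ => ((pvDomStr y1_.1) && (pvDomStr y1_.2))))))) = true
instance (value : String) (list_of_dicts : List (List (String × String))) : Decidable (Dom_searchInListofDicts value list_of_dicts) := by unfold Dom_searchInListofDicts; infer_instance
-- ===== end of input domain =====

-- B replaces A's full forward scan with snapshot bookkeeping by a reverse scan of the
-- enumerated list that returns at the first (i.e. last-index) matching dict; return values only.

-- ===== PORT A =====
-- one iteration of A's outer loop (state: varCheck, index, index_snapshot)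
def pvStepA (value : String) (st : Bool × Int × Int) (d : List (String × String)) : Bool × Int × Int :=
  let inner := d.foldl
    (fun (p : Bool × Int) kv =>
      if PySem.Dict.get? (PySem.Dict.mk d) kv.1 = some value then (true, st.2.1) else p)
    (st.1, st.2.2)
  (inner.1, st.2.1 + 1, inner.2)

def searchInListofDicts (value : String) (list_of_dicts : List (List (String × String))) : Bool × Int :=
  let st := list_of_dicts.foldl (pvStepA value) (false, 0, 0)
  (st.1, st.2.2)

-- ===== PORT B =====
def pvGoB (value : String) : List (Int × List (String × String)) → Bool × Int
  | [] => (false, 0)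
  | (i, d) :: rest => if d.any (fun kv => kv.2 == value) then (true, i) else pvGoB value rest

def searchInListofDicts_alt (value : String) (list_of_dicts : List (List (String × String))) : Bool × Int :=
  pvGoB value (PySem.List.enumerate list_of_dicts).reverse

-- ===== PRECONDITION & SPEC =====
-- Pre_ requires each inner association list (a Python dict) to have distinct keys: a Python
-- dict cannot hold duplicate keys, so on duplicate-key lists A's key-iteration-with-lookup
-- behaviour is an artefact of the association-list encoding, not of any Python input.
def Pre_searchInListofDicts (value : String) (list_of_dicts : List (List (String × String))) : Prop :=
  ∀ d ∈ list_of_dicts, (d.map Prod.fst).Nodup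
instance (value : String) (list_of_dicts : List (List (String × String))) : Decidable (Pre_searchInListofDicts value list_of_dicts) := by unfold Pre_searchInListofDicts; infer_instance

def pvWitness_searchInListofDicts : String × (List (List (String × String))) :=
  ("x", [[("a", "y")], [("b", "x"), ("c", "z")]])

def Spec_searchInListofDicts (value : String) (list_of_dicts : List (List (String × String))) (out : Bool × Int) : Prop := out = searchInListofDicts_alt value list_of_dicts
instance (value : String) (list_of_dicts : List (List (String × String))) (out : Bool × Int) : Decidable (Spec_searchInListofDicts value list_of_dicts out) := by unfold Spec_searchInListofDicts; infer_instance

-- ===== CLAIM (what is proved, stated in full; the proofs are below) =====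
def Claim_equal_searchInListofDicts : Prop := ∀ (value : String) (list_of_dicts : List (List (String × String))), Dom_searchInListofDicts value list_of_dicts → Pre_searchInListofDicts value list_of_dicts → Spec_searchInListofDicts value list_of_dicts (searchInListofDicts value list_of_dicts)

-- ===== LEMMAS AND PROOFS =====

-- index of the last dict containing `value`, counting from `i`
def pvLastIdx (value : String) : List (List (String × String)) → Int → Option Int
  | [], _ => none
  | d :: rest, i =>
    match pvLastIdx value rest (i + 1) with
    | some j => some j
    | none => if d.any (fun kv => kv.2 == value) then some i else none

theorem pv_get_mem {d : List (String × String)} (h : (d.map Prod.fst).Nodup)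
    {kv : String × String} (hm : kv ∈ d) :
    PySem.Dict.get? (PySem.Dict.mk d) kv.1 = some kv.2 := by
  induction d with
  | nil => cases hm
  | cons p rest ih =>
    obtain ⟨k, v⟩ := p
    simp only [List.map_cons, List.nodup_cons] at h
    rcases List.mem_cons.mp hm with rfl | hm'
    · simp [PySem.Dict.get?_mk_cons]
    · have hne : k ≠ kv.1 := fun he => h.1 (he ▸ List.mem_map_of_mem hm')
      rw [PySem.Dict.get?_mk_cons, if_neg (by simpa using hne)]
      exact ih h.2 hm'

theorem pv_fold_any (value : String) (idx : Int) (d : List (String × String)) :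
    ∀ p0 : Bool × Int,
    d.foldl (fun (p : Bool × Int) kv => if kv.2 == value then (true, idx) else p) p0
    = if d.any (fun kv => kv.2 == value) then (true, idx) else p0 := by
  induction d with
  | nil => intro p0; simp
  | cons kv rest ih =>
    intro p0
    simp only [List.foldl_cons, List.any_cons]
    by_cases he : (kv.2 == value) = true
    · rw [if_pos he, ih]
      simp [he]
    · rw [if_neg he, ih]
      have he' : (kv.2 == value) = false := Bool.eq_false_iff.mpr he
      simp only [he', Bool.false_or]

theorem pv_inner (value : String) (d : List (String × String)) (idx : Int)
    (h : (d.map Prod.fst).Nodup) (p0 : Bool × Int) :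
    d.foldl (fun (p : Bool × Int) kv =>
        if PySem.Dict.get? (PySem.Dict.mk d) kv.1 = some value then (true, idx) else p) p0
    = if d.any (fun kv => kv.2 == value) then (true, idx) else p0 := by
  have hc : d.foldl (fun (p : Bool × Int) kv =>
        if PySem.Dict.get? (PySem.Dict.mk d) kv.1 = some value then (true, idx) else p) p0
      = d.foldl (fun (p : Bool × Int) kv =>
        if kv.2 == value then (true, idx) else p) p0 := by
    apply PySem.List.foldl_congr_mem
    intro acc kv hm
    rw [pv_get_mem h hm]
    by_cases hv : kv.2 = value
    · simp [hv]
    · simp [hv]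
  rw [hc, pv_fold_any]

theorem pv_outer (value : String) (lds : List (List (String × String)))
    (h : ∀ d ∈ lds, (d.map Prod.fst).Nodup) :
    ∀ (i snap : Int) (vc : Bool),
    lds.foldl (pvStepA value) (vc, i, snap)
    = match pvLastIdx value lds i with
      | some j => (true, i + lds.length, j)
      | none => (vc, i + lds.length, snap) := by
  induction lds with
  | nil => intro i snap vc; simp [pvLastIdx]
  | cons d rest ih =>
    intro i snap vc
    have hd := h d (List.mem_cons_self ..)
    have hr : ∀ d' ∈ rest, (d'.map Prod.fst).Nodup := fun d' hm => h d' (List.mem_cons_of_mem _ hm)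
    have hin := pv_inner value d i hd (vc, snap)
    have hcast : ((d :: rest).length : Int) = (rest.length : Int) + 1 := by
      simp [List.length_cons]
    by_cases hany : (d.any fun kv => kv.2 == value) = true
    · have hstep : pvStepA value (vc, i, snap) d = (true, i + 1, i) := by
        unfold pvStepA
        dsimp only
        rw [hin, if_pos hany]
      rw [List.foldl_cons, hstep, ih hr (i + 1) i true]
      cases hL : pvLastIdx value rest (i + 1) with
      | some j =>
        simp only [pvLastIdx, hL, hcast]
        rw [show i + 1 + (rest.length : Int) = i + ((rest.length : Int) + 1) from by ring]
      | none =>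
        simp only [pvLastIdx, hL, hcast]
        rw [if_pos hany,
          show i + 1 + (rest.length : Int) = i + ((rest.length : Int) + 1) from by ring]
    · have hstep : pvStepA value (vc, i, snap) d = (vc, i + 1, snap) := by
        unfold pvStepA
        dsimp only
        rw [hin, if_neg hany]
      rw [List.foldl_cons, hstep, ih hr (i + 1) snap vc]
      cases hL : pvLastIdx value rest (i + 1) with
      | some j =>
        simp only [pvLastIdx, hL, hcast]
        rw [show i + 1 + (rest.length : Int) = i + ((rest.length : Int) + 1) from by ring]
      | none =>
        simp only [pvLastIdx, hL, hcast]
        rw [if_neg hany,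
          show i + 1 + (rest.length : Int) = i + ((rest.length : Int) + 1) from by ring]

theorem pvGoB_append (value : String) (xs ys : List (Int × List (String × String))) :
    pvGoB value (xs ++ ys)
    = if xs.any (fun p => p.2.any (fun kv => kv.2 == value)) then pvGoB value xs
      else pvGoB value ys := by
  induction xs with
  | nil => simp
  | cons p rest ih =>
    obtain ⟨i, d⟩ := p
    simp only [List.cons_append, pvGoB, List.any_cons]
    by_cases hd : (d.any fun kv => kv.2 == value) = true
    · rw [if_pos hd, hd]
      simp
    · have hd' : (d.any fun kv => kv.2 == value) = false := Bool.eq_false_iff.mpr hd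
      rw [if_neg hd, ih, hd']
      simp only [Bool.false_eq_true, if_false, Bool.false_or]

theorem pv_any_enumerate (value : String) (lds : List (List (String × String))) :
    ∀ i : Int, (PySem.List.enumerate lds i).any (fun p => p.2.any (fun kv => kv.2 == value))
      = lds.any (fun d => d.any (fun kv => kv.2 == value)) := by
  induction lds with
  | nil => intro i; simp [PySem.List.enumerate_nil]
  | cons d rest ih => intro i; simp [PySem.List.enumerate_cons, ih]

theorem pvLastIdx_none (value : String) (lds : List (List (String × String))) :
    ∀ i : Int, pvLastIdx value lds i = none ↔
      lds.any (fun d => d.any (fun kv => kv.2 == value)) = false := by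
  induction lds with
  | nil => intro i; simp [pvLastIdx]
  | cons d rest ih =>
    intro i
    simp only [pvLastIdx, List.any_cons, Bool.or_eq_false_iff]
    cases hrest : pvLastIdx value rest (i + 1) with
    | some j =>
      constructor
      · intro hcontra; cases hcontra
      · intro hfa
        exact absurd ((ih (i + 1)).mpr hfa.2) (by simp [hrest])
    | none =>
      have hr := (ih (i + 1)).mp hrest
      by_cases hd : (d.any fun kv => kv.2 == value) = true
      · rw [if_pos hd, hd, hr]
        constructor
        · intro hcontra; cases hcontra
        · intro hfa; exact absurd hfa.1 (by simp)
      · have hd' : (d.any fun kv => kv.2 == value) = false := Bool.eq_false_iff.mpr hd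
        rw [if_neg hd, hd', hr]
        simp

theorem pv_goB (value : String) (lds : List (List (String × String))) :
    ∀ i : Int, pvGoB value (PySem.List.enumerate lds i).reverse
    = match pvLastIdx value lds i with
      | some j => (true, j)
      | none => (false, 0) := by
  induction lds with
  | nil => intro i; simp [PySem.List.enumerate_nil, pvGoB, pvLastIdx]
  | cons d rest ih =>
    intro i
    rw [PySem.List.enumerate_cons, List.reverse_cons, pvGoB_append]
    rw [List.any_reverse, pv_any_enumerate]
    by_cases hrest : (rest.any fun d => d.any fun kv => kv.2 == value) = true
    · rw [if_pos hrest, ih (i + 1)]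
      cases hL : pvLastIdx value rest (i + 1) with
      | none => exact absurd ((pvLastIdx_none value rest (i + 1)).mp hL) (by simp [hrest])
      | some j => simp [pvLastIdx, hL]
    · have hn : pvLastIdx value rest (i + 1) = none :=
        (pvLastIdx_none value rest (i + 1)).mpr (Bool.eq_false_iff.mpr hrest)
      rw [if_neg hrest]
      simp only [pvLastIdx, hn, pvGoB]
      by_cases hd : (d.any fun kv => kv.2 == value) = true
      · rw [if_pos hd, if_pos hd]
      · rw [if_neg hd, if_neg hd]

-- ===== VERDICT (by name: the statement is the Claim_ definition above) =====
theorem searchInListofDicts_spec : Claim_equal_searchInListofDicts := by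
  intro value lds _ hpre
  unfold Spec_searchInListofDicts searchInListofDicts searchInListofDicts_alt
  rw [pv_outer value lds hpre 0 0 false, pv_goB value lds 0]
  cases pvLastIdx value lds 0 <;> simp
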